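-- pv_equiv track=rewrite | github.com/miliar/Code_Jam_Webscraper | Solutions_in_python/Problem_202/dsmall.py | f
-- ===== SOURCE A (Python) =====
-- def f(N, Ms):
--     star = (1,1)
--     changed = {}
--     for i in range(1, N+1):
--         if (1, i) in Ms:
--             if Ms[(1,i)] == 'x':
--                 star = (1, i)
--             elif Ms[(1,i)] == 'o':
--                 star = (1, i)
--
--     if star not in Ms or Ms[star] != 'o':
--         changed[star] = 'o'
--     for i in range(1, N+1):
--         if (1, i) not in Ms and star != (1,i):
--             changed[(1,i)] = '+'
--     for i in range(2, N):
--         if (N, i) not in Ms: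
--             changed[(N, i)]= '+'
--
--     if star == (1,1):
--         for i in range(2, N+1):
--             if (i, i) not in Ms:
--                 changed[(i, i)] = 'x'
--     elif star == (1, N):
--         for i in range(1, N+1):
--             if (i, N+1-i) not in Ms:
--                 changed[(i, N+1-i)] = 'x'
--     else:
--         for i in range(1, N+1):
--             p = (i, (star[1]-1+i-1)%(N)+1)
--             if star[1] == 2 and N%2==0:
--                 p = (p[0],(star[1]-i)%(N)+1)
--             if p not in Ms and p != star and p not in changed:
--                 changed[p] = 'x'
--
--             if i == N:
--                 star2 = p
--                 if N != 1:
--                     changed[star2] = 'o'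
--
--     score = 0
--     sb = {'+': 1, 'x': 1, 'o': 2}
--     for i in range(1, N+1):
--         for j in range(1, N+1):
--             if (i,j) in changed:
--                 score += sb[changed[(i,j)]]
--             elif (i,j) in Ms:
--                 score += sb[Ms[(i,j)]]
--
--     return score, changed
-- ===== SOURCE B (Python) =====
-- def f(N, Ms):
--     # Find the star: last cell (1, i), i = 1..N, marked 'x' or 'o' in Ms (default (1, 1)).
--     star = (1, 1)
--     for i in range(1, N + 1):
--         if Ms.get((1, i)) in ('x', 'o'):
--             star = (1, i)
--
--     changed = {}
--     if Ms.get(star) != 'o':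
--         changed[star] = 'o'
--     for q in [(1, i) for i in range(1, N + 1)]:
--         if q not in Ms and star != q:
--             changed[q] = '+'
--     for q in [(N, i) for i in range(2, N)]:
--         if q not in Ms:
--             changed[q] = '+'
--
--     if star == (1, 1):
--         for q in [(i, i) for i in range(2, N + 1)]:
--             if q not in Ms:
--                 changed[q] = 'x'
--     elif star == (1, N):
--         for q in [(i, N + 1 - i) for i in range(1, N + 1)]:
--             if q not in Ms:
--                 changed[q] = 'x'
--     else:
--         c = star[1]
--         if c == 2 and N % 2 == 0:
--             cells = [(i, (c - i) % N + 1) for i in range(1, N + 1)]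
--         else:
--             cells = [(i, (c + i - 2) % N + 1) for i in range(1, N + 1)]
--         for q in cells:
--             if q not in Ms and q != star and q not in changed:
--                 changed[q] = 'x'
--         changed[cells[-1]] = 'o'
--
--     # Score without scanning the whole N x N board: every changed cell is on the
--     # board, so sum over changed, then over the board cells of Ms not overwritten.
--     sb = {'+': 1, 'x': 1, 'o': 2}
--     score = sum(sb[v] for v in changed.values())
--     score += sum(sb[v] for k, v in Ms.items()
--                  if k not in changed and len(k) == 2
--                  and 1 <= k[0] <= N and 1 <= k[1] <= N)
--     return score, changed
-- ===== Notes on version B (the rewrite author's own statement) =====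
-- stated objective: faster
-- what changed: B computes the score by summing once over the changed dict and once over the Ms entries that lie on the board and are not overwritten, instead of A's scan of all N*N board cells; the board-completion phase is restructured over explicit cell lists with the diagonal-direction test hoisted out of the loop.
-- outside the precondition, e.g. on f(0, {}): A returns (0, {(1, 1): 'o'}), B returns (2, {(1, 1): 'o'}); on f(1, {(1, 1): 'z'}): A returns (2, {(1, 1): 'o'}), B returns (2, {(1, 1): 'o'})
import Mathlib
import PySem

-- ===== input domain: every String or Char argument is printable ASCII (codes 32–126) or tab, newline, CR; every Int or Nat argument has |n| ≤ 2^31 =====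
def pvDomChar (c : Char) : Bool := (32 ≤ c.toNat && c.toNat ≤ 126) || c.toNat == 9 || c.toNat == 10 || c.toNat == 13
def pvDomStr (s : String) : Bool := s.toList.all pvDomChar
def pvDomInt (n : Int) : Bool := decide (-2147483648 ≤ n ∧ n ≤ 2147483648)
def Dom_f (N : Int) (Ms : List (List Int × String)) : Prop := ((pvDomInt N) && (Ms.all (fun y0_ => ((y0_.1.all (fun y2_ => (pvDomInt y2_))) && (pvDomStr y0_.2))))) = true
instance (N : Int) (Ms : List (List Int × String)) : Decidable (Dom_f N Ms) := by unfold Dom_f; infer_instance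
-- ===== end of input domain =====

-- B changes the scoring phase from A's N×N board scan to two direct sums (over `changed`
-- and over the board entries of Ms not overwritten); equivalence is about the return value.

-- the score table sb = {'+': 1, 'x': 1, 'o': 2} (used by both programs)
def pvSb : PySem.Dict String Int := PySem.Dict.mk [("+", 1), ("x", 1), ("o", 2)]

-- ===== PORT A =====
def f (N : Int) (Ms : List (List Int × String)) : Int × (List (List Int × String)) :=
  let M : PySem.Dict (List Int) String := PySem.Dict.mk Ms
  let star : Int × Int := (1, 1)
  let star := (PySem.List.pyRange 1 (N+1) 1).foldl (fun star i =>
    match M.get? [1, i] with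
    | some v => if v = "x" then (1, i) else if v = "o" then (1, i) else star
    | none => star) star
  let changed : PySem.Dict (List Int) String := PySem.Dict.empty
  let changed := if M.get? [star.1, star.2] ≠ some "o" then changed.insert [star.1, star.2] "o" else changed
  let changed := (PySem.List.pyRange 1 (N+1) 1).foldl (fun ch i =>
    if M.get? [1, i] = none ∧ star ≠ (1, i) then ch.insert [1, i] "+" else ch) changed
  let changed := (PySem.List.pyRange 2 N 1).foldl (fun ch i =>
    if M.get? [N, i] = none then ch.insert [N, i] "+" else ch) changed
  let changed :=
    if star = (1, 1) then
      (PySem.List.pyRange 2 (N+1) 1).foldl (fun ch i =>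
        if M.get? [i, i] = none then ch.insert [i, i] "x" else ch) changed
    else if star = (1, N) then
      (PySem.List.pyRange 1 (N+1) 1).foldl (fun ch i =>
        if M.get? [i, N+1-i] = none then ch.insert [i, N+1-i] "x" else ch) changed
    else
      (PySem.List.pyRange 1 (N+1) 1).foldl (fun ch i =>
        let p : Int × Int := (i, PySem.Int.mod (star.2 - 1 + i - 1) N + 1)
        let p := if star.2 = 2 ∧ PySem.Int.mod N 2 = 0 then (p.1, PySem.Int.mod (star.2 - i) N + 1) else p
        let ch := if M.get? [p.1, p.2] = none ∧ p ≠ star ∧ ch.get? [p.1, p.2] = none then ch.insert [p.1, p.2] "x" else ch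
        if i = N then (if N ≠ 1 then ch.insert [p.1, p.2] "o" else ch) else ch) changed
  -- sb[...] : on grid values outside {'+','x','o'} Python raises KeyError — excluded by Pre_f
  let score := (PySem.List.pyRange 1 (N+1) 1).foldl (fun s i =>
    (PySem.List.pyRange 1 (N+1) 1).foldl (fun s j =>
      match changed.get? [i, j] with
      | some v => s + PySem.Dict.getD pvSb v 0
      | none => match M.get? [i, j] with
        | some v => s + PySem.Dict.getD pvSb v 0
        | none => s) s) 0
  (score, changed.items)

-- ===== PORT B =====
def f_alt (N : Int) (Ms : List (List Int × String)) : Int × (List (List Int × String)) :=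
  let M : PySem.Dict (List Int) String := PySem.Dict.mk Ms
  let star : Int × Int := (PySem.List.pyRange 1 (N+1) 1).foldl (fun star i =>
    if M.get? [1, i] = some "x" ∨ M.get? [1, i] = some "o" then (1, i) else star) (1, 1)
  let changed : PySem.Dict (List Int) String := PySem.Dict.empty
  let changed := if M.get? [star.1, star.2] ≠ some "o" then changed.insert [star.1, star.2] "o" else changed
  let changed := ((PySem.List.pyRange 1 (N+1) 1).map (fun i => ((1 : Int), i))).foldl (fun ch q =>
    if M.get? [q.1, q.2] = none ∧ star ≠ q then ch.insert [q.1, q.2] "+" else ch) changed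
  let changed := ((PySem.List.pyRange 2 N 1).map (fun i => (N, i))).foldl (fun ch q =>
    if M.get? [q.1, q.2] = none then ch.insert [q.1, q.2] "+" else ch) changed
  let changed :=
    if star = (1, 1) then
      ((PySem.List.pyRange 2 (N+1) 1).map (fun i => (i, i))).foldl (fun ch q =>
        if M.get? [q.1, q.2] = none then ch.insert [q.1, q.2] "x" else ch) changed
    else if star = (1, N) then
      ((PySem.List.pyRange 1 (N+1) 1).map (fun i => (i, N+1-i))).foldl (fun ch q =>
        if M.get? [q.1, q.2] = none then ch.insert [q.1, q.2] "x" else ch) changed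
    else
      let c := star.2
      let cells :=
        if c = 2 ∧ PySem.Int.mod N 2 = 0 then
          (PySem.List.pyRange 1 (N+1) 1).map (fun i => (i, PySem.Int.mod (c - i) N + 1))
        else
          (PySem.List.pyRange 1 (N+1) 1).map (fun i => (i, PySem.Int.mod (c + i - 2) N + 1))
      let changed := cells.foldl (fun ch q =>
        if M.get? [q.1, q.2] = none ∧ q ≠ star ∧ ch.get? [q.1, q.2] = none then ch.insert [q.1, q.2] "x" else ch) changed
      -- cells[-1]: cells is nonempty in this branch (it needs N ≥ 3), so pyGet? never misses
      match PySem.List.pyGet? cells (-1) with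
      | some q => changed.insert [q.1, q.2] "o"
      | none => changed
  let score := changed.values.foldl (fun s v => s + PySem.Dict.getD pvSb v 0) 0
  let score := M.items.foldl (fun s kv =>
    if changed.get? kv.1 = none ∧ PySem.List.len kv.1 = 2 ∧
       1 ≤ PySem.List.pyGetD kv.1 0 (0 : Int) ∧ PySem.List.pyGetD kv.1 0 (0 : Int) ≤ N ∧
       1 ≤ PySem.List.pyGetD kv.1 1 (0 : Int) ∧ PySem.List.pyGetD kv.1 1 (0 : Int) ≤ N
    then s + PySem.Dict.getD pvSb kv.2 0 else s) score
  (score, changed.items)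

-- ===== PRECONDITION & SPEC =====
def pvInGrid (N : Int) (k : List Int) : Bool :=
  match k with
  | [r, c] => decide (1 ≤ r ∧ r ≤ N ∧ 1 ≤ c ∧ c ≤ N)
  | _ => false

-- Pre_f excludes: N ≤ 0 (board-size N is naturally positive; for N ≤ 0 B would count A's
-- spurious off-board cell); duplicate keys in Ms (no Python dict has them); board entries
-- of Ms with a value outside {'+','x','o'}, on which A's score lookup sb[...] can raise KeyError.
def Pre_f (N : Int) (Ms : List (List Int × String)) : Prop :=
  1 ≤ N ∧ (Ms.map Prod.fst).Nodup ∧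
  ∀ kv ∈ Ms, pvInGrid N kv.1 = true → (kv.2 = "+" ∨ kv.2 = "x" ∨ kv.2 = "o")
instance (N : Int) (Ms : List (List Int × String)) : Decidable (Pre_f N Ms) := by
  unfold Pre_f; infer_instance

def pvWitness_f : Int × (List (List Int × String)) := (3, [([1, 2], "x")])

def Spec_f (N : Int) (Ms : List (List Int × String)) (out : Int × (List (List Int × String))) : Prop := out = f_alt N Ms
instance (N : Int) (Ms : List (List Int × String)) (out : Int × (List (List Int × String))) : Decidable (Spec_f N Ms out) := by unfold Spec_f; infer_instance

-- ===== CLAIM (what is proved, stated in full; the proofs are below) =====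
def Claim_equal_f : Prop := ∀ (N : Int) (Ms : List (List Int × String)), Dom_f N Ms → Pre_f N Ms → Spec_f N Ms (f N Ms)


-- ===== LEMMAS AND PROOFS =====

theorem pvFoldPres {α β : Type} (P : β → Prop) (l : List α) (g : β → α → β) (d : β)
    (h : ∀ d' a, a ∈ l → P d' → P (g d' a)) (h0 : P d) : P (l.foldl g d) := by
  induction l generalizing d with
  | nil => exact h0
  | cons x t ih =>
      exact ih _ (fun d' a ha => h d' a (List.mem_cons_of_mem _ ha)) (h d x (List.mem_cons_self) h0)

theorem pvSumSpike (L : List (List Int)) (k0 : List Int) (a : Int) (hL : L.Nodup) :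
    (L.map (fun k => if k = k0 then a else 0)).sum = if k0 ∈ L then a else 0 := by
  induction L with
  | nil => simp
  | cons x t ih =>
      rcases List.nodup_cons.mp hL with ⟨hx, ht⟩
      by_cases hxk : x = k0
      · subst hxk
        rw [List.map_cons, List.sum_cons, if_pos rfl, ih ht, if_neg hx, if_pos List.mem_cons_self]
        ring
      · rw [List.map_cons, List.sum_cons, if_neg hxk, ih ht]
        simp [List.mem_cons, Ne.symm hxk]

theorem pvSumDict (t : List (List Int × String)) (L : List (List Int)) (h : List Int → String → Int)
    (hk : (t.map Prod.fst).Nodup) (hL : L.Nodup) :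
    (L.map (fun k => match (PySem.Dict.mk t).get? k with | some v => h k v | none => 0)).sum
      = (t.map (fun kv => if kv.1 ∈ L then h kv.1 kv.2 else 0)).sum := by
  induction t with
  | nil => simp [PySem.Dict.get?]
  | cons e t ih =>
      rcases List.nodup_cons.mp hk with ⟨he, ht⟩
      have hnone : (PySem.Dict.mk t).get? e.1 = none := by
        rw [PySem.Dict.get?_eq_none_iff_not_mem_keys]
        simpa using he
      have hpt : ∀ k : List Int,
          (match (PySem.Dict.mk (e :: t)).get? k with | some v => h k v | none => 0)
            = (if k = e.1 then h e.1 e.2 else 0)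
              + (match (PySem.Dict.mk t).get? k with | some v => h k v | none => 0) := by
        intro k
        rw [show (PySem.Dict.mk (e :: t)) = PySem.Dict.mk ((e.1, e.2) :: t) by simp]
        rw [PySem.Dict.get?_mk_cons]
        by_cases hke : k = e.1
        · simp [hke, hnone]
        · simp [hke, Ne.symm hke]
      calc (L.map _).sum
          = (L.map (fun k => (if k = e.1 then h e.1 e.2 else 0)
              + (match (PySem.Dict.mk t).get? k with | some v => h k v | none => 0))).sum := by
            exact congrArg List.sum (List.map_congr_left (fun k _ => hpt k))
        _ = (if e.1 ∈ L then h e.1 e.2 else 0) + (t.map (fun kv => if kv.1 ∈ L then h kv.1 kv.2 else 0)).sum := by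
            rw [PySem.List.sum_map_add_int, pvSumSpike L e.1 _ hL, ih ht]
        _ = _ := by simp


def pvG (N : Int) : List (List Int) :=
  (PySem.List.pyRange 1 (N+1) 1).flatMap (fun i => (PySem.List.pyRange 1 (N+1) 1).map (fun j => [i, j]))

def pvF (C M : PySem.Dict (List Int) String) (k : List Int) : Int :=
  match C.get? k with
  | some v => PySem.Dict.getD pvSb v 0
  | none => match M.get? k with
    | some v => PySem.Dict.getD pvSb v 0
    | none => 0

theorem pvG_nodup (N : Int) : (pvG N).Nodup := by
  unfold pvG
  apply List.nodup_flatMap.mpr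
  constructor
  · intro i _
    exact (PySem.List.nodup_pyRange_one 1 (N+1)).map (by intro a b h; simpa using h)
  · apply (PySem.List.nodup_pyRange_one 1 (N+1)).pairwise_of_forall_ne
    intro i _ j _ hij
    simp only [List.Disjoint]
    intro k hk hk'
    simp only [List.mem_map] at hk hk'
    obtain ⟨a, _, ha⟩ := hk; obtain ⟨b, _, hb⟩ := hk'
    rw [← ha] at hb
    exact hij (by simpa using hb : j = i ∧ b = a).1.symm

theorem mem_pvG (N : Int) (k : List Int) :
    k ∈ pvG N ↔ ∃ i j, k = [i, j] ∧ 1 ≤ i ∧ i ≤ N ∧ 1 ≤ j ∧ j ≤ N := by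
  unfold pvG
  simp only [List.mem_flatMap, List.mem_map, PySem.List.mem_pyRange_one]
  constructor
  · rintro ⟨i, ⟨hi1, hi2⟩, j, ⟨hj1, hj2⟩, rfl⟩
    exact ⟨i, j, rfl, hi1, by omega, hj1, by omega⟩
  · rintro ⟨i, j, rfl, hi1, hi2, hj1, hj2⟩
    exact ⟨i, ⟨hi1, by omega⟩, j, ⟨hj1, by omega⟩, rfl⟩

theorem pvScoreA (N : Int) (C M : PySem.Dict (List Int) String) :
    (PySem.List.pyRange 1 (N+1) 1).foldl (fun s i =>
      (PySem.List.pyRange 1 (N+1) 1).foldl (fun s j =>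
        match C.get? [i, j] with
        | some v => s + PySem.Dict.getD pvSb v 0
        | none => match M.get? [i, j] with
          | some v => s + PySem.Dict.getD pvSb v 0
          | none => s) s) 0
    = ((pvG N).map (pvF C M)).sum := by
  have hinner : ∀ (i : Int) (s : Int),
      (PySem.List.pyRange 1 (N+1) 1).foldl (fun s j =>
        match C.get? [i, j] with
        | some v => s + PySem.Dict.getD pvSb v 0
        | none => match M.get? [i, j] with
          | some v => s + PySem.Dict.getD pvSb v 0
          | none => s) s
      = s + (((PySem.List.pyRange 1 (N+1) 1).map (fun j => pvF C M [i, j]))).sum := by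
    intro i s
    rw [show (fun s j =>
        match C.get? [i, j] with
        | some v => s + PySem.Dict.getD pvSb v 0
        | none => match M.get? [i, j] with
          | some v => s + PySem.Dict.getD pvSb v 0
          | none => s) = (fun (s j : Int) => s + pvF C M [i, j]) from ?_]
    · exact PySem.List.foldl_add _ _ _
    · funext s j
      unfold pvF
      cases C.get? [i, j] with
      | some v => rfl
      | none => cases M.get? [i, j] with
        | some v => rfl
        | none => simp
  rw [show (fun s i =>
      (PySem.List.pyRange 1 (N+1) 1).foldl (fun s j =>
        match C.get? [i, j] with
        | some v => s + PySem.Dict.getD pvSb v 0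
        | none => match M.get? [i, j] with
          | some v => s + PySem.Dict.getD pvSb v 0
          | none => s) s)
    = (fun (s i : Int) => s + (((PySem.List.pyRange 1 (N+1) 1).map (fun j => pvF C M [i, j]))).sum) from ?_]
  · rw [PySem.List.foldl_add _ _ _]
    unfold pvG
    rw [List.map_flatMap]
    rw [List.flatMap_def, List.sum_flatten, List.map_map, zero_add]
    exact congrArg List.sum (List.map_congr_left (fun i _ => by
      simp only [Function.comp_def, Function.comp_apply, List.map_map]))
  · funext s i
    exact hinner i s

theorem pvDictEta (C : PySem.Dict (List Int) String) : PySem.Dict.mk C.items = C := rfl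

theorem pvScoreSplit (N : Int) (C : PySem.Dict (List Int) String) (Ms : List (List Int × String))
    (hCn : C.keys.Nodup) (hCG : ∀ k ∈ C.keys, k ∈ pvG N) (hMn : (Ms.map Prod.fst).Nodup) :
    ((pvG N).map (pvF C (PySem.Dict.mk Ms))).sum
      = (C.values.map (fun v => PySem.Dict.getD pvSb v 0)).sum
        + (Ms.map (fun kv => if kv.1 ∈ pvG N ∧ C.get? kv.1 = none
            then PySem.Dict.getD pvSb kv.2 0 else 0)).sum := by
  have hsplit : ∀ k, pvF C (PySem.Dict.mk Ms) k
      = (match C.get? k with | some v => PySem.Dict.getD pvSb v 0 | none => 0)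
        + (match (PySem.Dict.mk Ms).get? k with
            | some v => (if C.get? k = none then PySem.Dict.getD pvSb v 0 else 0)
            | none => 0) := by
    intro k
    unfold pvF
    cases hc : C.get? k with
    | some v => cases (PySem.Dict.mk Ms).get? k with
      | some w => simp
      | none => simp
    | none => cases (PySem.Dict.mk Ms).get? k with
      | some w => simp
      | none => simp
  rw [List.map_congr_left (fun k _ => hsplit k), PySem.List.sum_map_add_int]
  congr 1
  · have h1 := pvSumDict C.items (pvG N)
      (fun _ v => PySem.Dict.getD pvSb v 0) hCn (pvG_nodup N)
    rw [pvDictEta] at h1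
    beta_reduce at h1
    have h3 : (C.items.map (fun kv => if kv.1 ∈ pvG N then PySem.Dict.getD pvSb kv.2 0 else 0)).sum
        = (C.values.map (fun v => PySem.Dict.getD pvSb v 0)).sum := by
      rw [List.map_congr_left (fun kv hkv => if_pos (hCG kv.1 (List.mem_map_of_mem hkv)))]
      rw [show C.values = C.items.map (·.2) from rfl, List.map_map]
      rfl
    exact h1.trans h3
  · have h1 := pvSumDict Ms (pvG N)
      (fun k v => if C.get? k = none then PySem.Dict.getD pvSb v 0 else 0) hMn (pvG_nodup N)
    beta_reduce at h1
    have h3 : (Ms.map (fun kv => if kv.1 ∈ pvG N then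
          (if C.get? kv.1 = none then PySem.Dict.getD pvSb kv.2 0 else 0) else 0)).sum
        = (Ms.map (fun kv => if kv.1 ∈ pvG N ∧ C.get? kv.1 = none
            then PySem.Dict.getD pvSb kv.2 0 else 0)).sum := by
      apply congrArg List.sum
      apply List.map_congr_left
      intro kv _
      by_cases hm : kv.1 ∈ pvG N <;> by_cases hc : C.get? kv.1 = none <;> simp [hm, hc]
    exact h1.trans h3


-- stage views of the two ports (definitionally equal to the lets inside f / f_alt)
def pvStarA (N : Int) (M : PySem.Dict (List Int) String) : Int × Int :=
  (PySem.List.pyRange 1 (N+1) 1).foldl (fun star i =>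
    match M.get? [1, i] with
    | some v => if v = "x" then (1, i) else if v = "o" then (1, i) else star
    | none => star) (1, 1)

def pvStarB (N : Int) (M : PySem.Dict (List Int) String) : Int × Int :=
  (PySem.List.pyRange 1 (N+1) 1).foldl (fun star i =>
    if M.get? [1, i] = some "x" ∨ M.get? [1, i] = some "o" then (1, i) else star) (1, 1)

def pvChangedA (N : Int) (M : PySem.Dict (List Int) String) (star : Int × Int) : PySem.Dict (List Int) String :=
  let changed : PySem.Dict (List Int) String := PySem.Dict.empty
  let changed := if M.get? [star.1, star.2] ≠ some "o" then changed.insert [star.1, star.2] "o" else changed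
  let changed := (PySem.List.pyRange 1 (N+1) 1).foldl (fun ch i =>
    if M.get? [1, i] = none ∧ star ≠ (1, i) then ch.insert [1, i] "+" else ch) changed
  let changed := (PySem.List.pyRange 2 N 1).foldl (fun ch i =>
    if M.get? [N, i] = none then ch.insert [N, i] "+" else ch) changed
  if star = (1, 1) then
    (PySem.List.pyRange 2 (N+1) 1).foldl (fun ch i =>
      if M.get? [i, i] = none then ch.insert [i, i] "x" else ch) changed
  else if star = (1, N) then
    (PySem.List.pyRange 1 (N+1) 1).foldl (fun ch i =>
      if M.get? [i, N+1-i] = none then ch.insert [i, N+1-i] "x" else ch) changed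
  else
    (PySem.List.pyRange 1 (N+1) 1).foldl (fun ch i =>
      let p : Int × Int := (i, PySem.Int.mod (star.2 - 1 + i - 1) N + 1)
      let p := if star.2 = 2 ∧ PySem.Int.mod N 2 = 0 then (p.1, PySem.Int.mod (star.2 - i) N + 1) else p
      let ch := if M.get? [p.1, p.2] = none ∧ p ≠ star ∧ ch.get? [p.1, p.2] = none then ch.insert [p.1, p.2] "x" else ch
      if i = N then (if N ≠ 1 then ch.insert [p.1, p.2] "o" else ch) else ch) changed

def pvChangedB (N : Int) (M : PySem.Dict (List Int) String) (star : Int × Int) : PySem.Dict (List Int) String :=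
  let changed : PySem.Dict (List Int) String := PySem.Dict.empty
  let changed := if M.get? [star.1, star.2] ≠ some "o" then changed.insert [star.1, star.2] "o" else changed
  let changed := ((PySem.List.pyRange 1 (N+1) 1).map (fun i => ((1 : Int), i))).foldl (fun ch q =>
    if M.get? [q.1, q.2] = none ∧ star ≠ q then ch.insert [q.1, q.2] "+" else ch) changed
  let changed := ((PySem.List.pyRange 2 N 1).map (fun i => (N, i))).foldl (fun ch q =>
    if M.get? [q.1, q.2] = none then ch.insert [q.1, q.2] "+" else ch) changed
  if star = (1, 1) then
    ((PySem.List.pyRange 2 (N+1) 1).map (fun i => (i, i))).foldl (fun ch q =>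
      if M.get? [q.1, q.2] = none then ch.insert [q.1, q.2] "x" else ch) changed
  else if star = (1, N) then
    ((PySem.List.pyRange 1 (N+1) 1).map (fun i => (i, N+1-i))).foldl (fun ch q =>
      if M.get? [q.1, q.2] = none then ch.insert [q.1, q.2] "x" else ch) changed
  else
    let c := star.2
    let cells :=
      if c = 2 ∧ PySem.Int.mod N 2 = 0 then
        (PySem.List.pyRange 1 (N+1) 1).map (fun i => (i, PySem.Int.mod (c - i) N + 1))
      else
        (PySem.List.pyRange 1 (N+1) 1).map (fun i => (i, PySem.Int.mod (c + i - 2) N + 1))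
    let changed := cells.foldl (fun ch q =>
      if M.get? [q.1, q.2] = none ∧ q ≠ star ∧ ch.get? [q.1, q.2] = none then ch.insert [q.1, q.2] "x" else ch) changed
    match PySem.List.pyGet? cells (-1) with
    | some q => changed.insert [q.1, q.2] "o"
    | none => changed

def pvScoreGridA (N : Int) (C M : PySem.Dict (List Int) String) : Int :=
  (PySem.List.pyRange 1 (N+1) 1).foldl (fun s i =>
    (PySem.List.pyRange 1 (N+1) 1).foldl (fun s j =>
      match C.get? [i, j] with
      | some v => s + PySem.Dict.getD pvSb v 0
      | none => match M.get? [i, j] with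
        | some v => s + PySem.Dict.getD pvSb v 0
        | none => s) s) 0

def pvScoreSumB (N : Int) (C M : PySem.Dict (List Int) String) : Int :=
  let score := C.values.foldl (fun s v => s + PySem.Dict.getD pvSb v 0) 0
  M.items.foldl (fun s kv =>
    if C.get? kv.1 = none ∧ PySem.List.len kv.1 = 2 ∧
       1 ≤ PySem.List.pyGetD kv.1 0 (0 : Int) ∧ PySem.List.pyGetD kv.1 0 (0 : Int) ≤ N ∧
       1 ≤ PySem.List.pyGetD kv.1 1 (0 : Int) ∧ PySem.List.pyGetD kv.1 1 (0 : Int) ≤ N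
    then s + PySem.Dict.getD pvSb kv.2 0 else s) score

theorem pv_f_view (N : Int) (Ms : List (List Int × String)) :
    f N Ms = (pvScoreGridA N (pvChangedA N (PySem.Dict.mk Ms) (pvStarA N (PySem.Dict.mk Ms))) (PySem.Dict.mk Ms),
      (pvChangedA N (PySem.Dict.mk Ms) (pvStarA N (PySem.Dict.mk Ms))).items) := rfl

theorem pv_falt_view (N : Int) (Ms : List (List Int × String)) :
    f_alt N Ms = (pvScoreSumB N (pvChangedB N (PySem.Dict.mk Ms) (pvStarB N (PySem.Dict.mk Ms))) (PySem.Dict.mk Ms),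
      (pvChangedB N (PySem.Dict.mk Ms) (pvStarB N (PySem.Dict.mk Ms))).items) := rfl

def pvInv (N : Int) (d : PySem.Dict (List Int) String) : Prop :=
  d.keys.Nodup ∧ ∀ k ∈ d.keys, k ∈ pvG N

theorem pvStar_eq (N : Int) (M : PySem.Dict (List Int) String) : pvStarA N M = pvStarB N M := by
  unfold pvStarA pvStarB
  apply PySem.List.foldl_congr_mem
  intro acc i _
  cases h : M.get? [1, i] with
  | none => simp
  | some v => by_cases hx : v = "x" <;> by_cases ho : v = "o" <;> simp [hx, ho]

theorem pvStar_shape (N : Int) (M : PySem.Dict (List Int) String) :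
    pvStarB N M = (1, 1) ∨ ∃ i, 1 ≤ i ∧ i ≤ N ∧ pvStarB N M = (1, i) := by
  unfold pvStarB
  apply pvFoldPres (fun st => st = (1, 1) ∨ ∃ i, 1 ≤ i ∧ i ≤ N ∧ st = (1, i))
  · intro d' a ha hd'
    by_cases h : M.get? [1, a] = some "x" ∨ M.get? [1, a] = some "o"
    · rw [if_pos h]
      right
      rcases PySem.List.mem_pyRange_one.mp ha with ⟨h1, h2⟩
      exact ⟨a, h1, by omega, rfl⟩
    · rw [if_neg h]; exact hd'
  · exact Or.inl rfl

theorem pvElseSplit (N : Int) (M : PySem.Dict (List Int) String) (star : Int × Int)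
    (pf : Int → Int × Int) (d : PySem.Dict (List Int) String) (hN3 : 3 ≤ N) :
    (PySem.List.pyRange 1 (N+1) 1).foldl (fun ch i =>
      let q := pf i
      let ch2 := if M.get? [q.1, q.2] = none ∧ q ≠ star ∧ ch.get? [q.1, q.2] = none
        then ch.insert [q.1, q.2] "x" else ch
      if i = N then (if N ≠ 1 then ch2.insert [q.1, q.2] "o" else ch2) else ch2) d
    = match PySem.List.pyGet? ((PySem.List.pyRange 1 (N+1) 1).map pf) (-1) with
      | some q => (((PySem.List.pyRange 1 (N+1) 1).map pf).foldl (fun ch q =>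
          if M.get? [q.1, q.2] = none ∧ q ≠ star ∧ ch.get? [q.1, q.2] = none
          then ch.insert [q.1, q.2] "x" else ch) d).insert [q.1, q.2] "o"
      | none => ((PySem.List.pyRange 1 (N+1) 1).map pf).foldl (fun ch q =>
          if M.get? [q.1, q.2] = none ∧ q ≠ star ∧ ch.get? [q.1, q.2] = none
          then ch.insert [q.1, q.2] "x" else ch) d := by
  have hsplitR : PySem.List.pyRange 1 (N+1) 1 = PySem.List.pyRange 1 N 1 ++ [N] :=
    PySem.List.pyRange_one_succ_right (by omega)
  rw [hsplitR, List.foldl_append, List.map_append]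
  rw [show List.map pf [N] = [pf N] from rfl]
  rw [PySem.List.pyGet?_neg_one_append_singleton]
  rw [List.foldl_append]
  rw [List.foldl_cons, List.foldl_nil, List.foldl_cons, List.foldl_nil]
  dsimp only []
  rw [if_pos (rfl : N = N), if_pos (show N ≠ 1 by omega)]
  rw [List.foldl_map]
  have hinner : (PySem.List.pyRange 1 N 1).foldl (fun ch i =>
      let q := pf i
      let ch2 := if M.get? [q.1, q.2] = none ∧ q ≠ star ∧ ch.get? [q.1, q.2] = none
        then ch.insert [q.1, q.2] "x" else ch
      if i = N then (if N ≠ 1 then ch2.insert [q.1, q.2] "o" else ch2) else ch2) d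
    = (PySem.List.pyRange 1 N 1).foldl (fun ch i =>
      if M.get? [(pf i).1, (pf i).2] = none ∧ pf i ≠ star ∧ ch.get? [(pf i).1, (pf i).2] = none
      then ch.insert [(pf i).1, (pf i).2] "x" else ch) d := by
    apply PySem.List.foldl_congr_mem
    intro acc x hx
    rcases PySem.List.mem_pyRange_one.mp hx with ⟨hx1, hx2⟩
    dsimp only []
    rw [if_neg (show ¬ x = N by omega)]
  rw [hinner]

theorem pvChanged_eq (N : Int) (M : PySem.Dict (List Int) String) (star : Int × Int)
    (hN : 1 ≤ N) (hs : star = (1, 1) ∨ ∃ i, 1 ≤ i ∧ i ≤ N ∧ star = (1, i)) :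
    pvChangedA N M star = pvChangedB N M star := by
  unfold pvChangedA pvChangedB
  dsimp only []
  simp only [List.foldl_map]
  by_cases hs1 : star = (1, 1)
  · simp only [if_pos hs1]
  by_cases hsN : star = (1, N)
  · simp only [if_neg hs1, if_pos hsN]
  simp only [if_neg hs1, if_neg hsN]
  rcases hs with h | ⟨i, hi1, hi2, hstar⟩
  · exact absurd h hs1
  have hi1' : i ≠ 1 := fun h => hs1 (by rw [hstar, h])
  have hiN : i ≠ N := fun h => hsN (by rw [hstar, h])
  have hN3 : 3 ≤ N := by omega
  by_cases hcase : star.2 = 2 ∧ PySem.Int.mod N 2 = 0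
  · rw [if_pos hcase]
    refine Eq.trans (PySem.List.foldl_congr_mem _ _ _ _ ?_)
      (pvElseSplit N M star (fun i_ => (i_, PySem.Int.mod (star.2 - i_) N + 1)) _ hN3)
    intro acc x hx
    dsimp only []
    rw [if_pos hcase]
  · rw [if_neg hcase]
    refine Eq.trans (PySem.List.foldl_congr_mem _ _ _ _ ?_)
      (pvElseSplit N M star (fun i_ => (i_, PySem.Int.mod (star.2 + i_ - 2) N + 1)) _ hN3)
    intro acc x hx
    dsimp only []
    rw [if_neg hcase]
    rw [show star.2 - 1 + x - 1 = star.2 + x - 2 from by ring]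

theorem pvStepInv (N : Int) (d : PySem.Dict (List Int) String) (k : List Int) (v : String)
    (hk : k ∈ pvG N) (hd : pvInv N d) : pvInv N (d.insert k v) := by
  obtain ⟨hn, hg⟩ := hd
  refine ⟨PySem.Dict.nodup_keys_insert d k v hn, ?_⟩
  intro k' hk'
  rcases (PySem.Dict.mem_keys_insert d k k' v).mp hk' with h | h
  · exact h ▸ hk
  · exact hg k' h

theorem pvPairGrid (N : Int) (q : Int × Int) (h1 : 1 ≤ q.1) (h2 : q.1 ≤ N) (h3 : 1 ≤ q.2) (h4 : q.2 ≤ N) :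
    [q.1, q.2] ∈ pvG N :=
  (mem_pvG N [q.1, q.2]).mpr ⟨q.1, q.2, rfl, h1, h2, h3, h4⟩

theorem pvElseInv (N : Int) (M : PySem.Dict (List Int) String) (star : Int × Int)
    (d2 : PySem.Dict (List Int) String) (L : List (Int × Int)) (hd2 : pvInv N d2)
    (hL : ∀ q ∈ L, [q.1, q.2] ∈ pvG N) :
    pvInv N (match PySem.List.pyGet? L (-1) with
      | some q => (L.foldl (fun ch q =>
          if M.get? [q.1, q.2] = none ∧ q ≠ star ∧ ch.get? [q.1, q.2] = none then ch.insert [q.1, q.2] "x" else ch) d2).insert [q.1, q.2] "o"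
      | none => L.foldl (fun ch q =>
          if M.get? [q.1, q.2] = none ∧ q ≠ star ∧ ch.get? [q.1, q.2] = none then ch.insert [q.1, q.2] "x" else ch) d2) := by
  have hfold : pvInv N (L.foldl (fun ch q =>
      if M.get? [q.1, q.2] = none ∧ q ≠ star ∧ ch.get? [q.1, q.2] = none then ch.insert [q.1, q.2] "x" else ch) d2) := by
    apply pvFoldPres _ _ _ _ ?_ hd2
    intro d' q hq hd'
    split_ifs
    · exact pvStepInv N _ _ _ (hL q hq) hd'
    · exact hd'
  cases hlast : PySem.List.pyGet? L (-1) with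
  | none => exact hfold
  | some q => exact pvStepInv N _ _ _ (hL q (PySem.List.mem_of_pyGet?_eq_some L hlast)) hfold

theorem pvChanged_inv (N : Int) (M : PySem.Dict (List Int) String) (star : Int × Int)
    (hN : 1 ≤ N) (hs : star = (1, 1) ∨ ∃ i, 1 ≤ i ∧ i ≤ N ∧ star = (1, i)) :
    pvInv N (pvChangedB N M star) := by
  have hstar : [star.1, star.2] ∈ pvG N := by
    rcases hs with h | ⟨i, hi1, hi2, h⟩
    · rw [h]; exact pvPairGrid N (1, 1) (by norm_num) (by norm_num; omega) (by norm_num) (by norm_num; omega)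
    · rw [h]; exact pvPairGrid N (1, i) (by norm_num) (by norm_num; omega) (by simpa using hi1) (by simpa using hi2)
  have hempty : pvInv N (PySem.Dict.empty : PySem.Dict (List Int) String) := by
    refine ⟨PySem.Dict.nodup_keys_empty, ?_⟩
    intro k hk
    simp [PySem.Dict.keys_empty] at hk
  unfold pvChangedB
  dsimp only []
  have hd0 : pvInv N (if M.get? [star.1, star.2] ≠ some "o"
      then (PySem.Dict.empty : PySem.Dict (List Int) String).insert [star.1, star.2] "o" else PySem.Dict.empty) := by
    split_ifs
    · exact pvStepInv N _ _ _ hstar hempty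
    · exact hempty
  generalize (if M.get? [star.1, star.2] ≠ some "o"
      then (PySem.Dict.empty : PySem.Dict (List Int) String).insert [star.1, star.2] "o" else PySem.Dict.empty) = d0 at hd0 ⊢
  have hd1 : pvInv N
      (((PySem.List.pyRange 1 (N+1) 1).map (fun i => ((1 : Int), i))).foldl (fun ch q =>
        if M.get? [q.1, q.2] = none ∧ star ≠ q then ch.insert [q.1, q.2] "+" else ch) d0) := by
    apply pvFoldPres _ _ _ _ ?_ hd0
    intro d' q hq hd'
    rcases List.mem_map.mp hq with ⟨i, hi, rfl⟩
    rcases PySem.List.mem_pyRange_one.mp hi with ⟨hi1, hi2⟩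
    split_ifs
    · exact pvStepInv N _ _ _ (pvPairGrid N (1, i) (by norm_num) (by norm_num; omega) (by simpa using hi1) (by norm_num; omega)) hd'
    · exact hd'
  generalize (((PySem.List.pyRange 1 (N+1) 1).map (fun i => ((1 : Int), i))).foldl (fun ch q =>
      if M.get? [q.1, q.2] = none ∧ star ≠ q then ch.insert [q.1, q.2] "+" else ch) d0) = d1 at hd1 ⊢
  have hd2 : pvInv N
      (((PySem.List.pyRange 2 N 1).map (fun i => (N, i))).foldl (fun ch q =>
        if M.get? [q.1, q.2] = none then ch.insert [q.1, q.2] "+" else ch) d1) := by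
    apply pvFoldPres _ _ _ _ ?_ hd1
    intro d' q hq hd'
    rcases List.mem_map.mp hq with ⟨i, hi, rfl⟩
    rcases PySem.List.mem_pyRange_one.mp hi with ⟨hi1, hi2⟩
    split_ifs
    · exact pvStepInv N _ _ _ (pvPairGrid N (N, i) (by simpa using hN) (by norm_num) (by norm_num; omega) (by norm_num; omega)) hd'
    · exact hd'
  generalize (((PySem.List.pyRange 2 N 1).map (fun i => (N, i))).foldl (fun ch q =>
      if M.get? [q.1, q.2] = none then ch.insert [q.1, q.2] "+" else ch) d1) = d2 at hd2 ⊢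
  split_ifs with hs1 hsN
  · apply pvFoldPres _ _ _ _ ?_ hd2
    intro d' q hq hd'
    rcases List.mem_map.mp hq with ⟨i, hi, rfl⟩
    rcases PySem.List.mem_pyRange_one.mp hi with ⟨hi1, hi2⟩
    split_ifs
    · exact pvStepInv N _ _ _ (pvPairGrid N (i, i) (by norm_num; omega) (by norm_num; omega) (by norm_num; omega) (by norm_num; omega)) hd'
    · exact hd'
  · apply pvFoldPres _ _ _ _ ?_ hd2
    intro d' q hq hd'
    rcases List.mem_map.mp hq with ⟨i, hi, rfl⟩
    rcases PySem.List.mem_pyRange_one.mp hi with ⟨hi1, hi2⟩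
    split_ifs
    · exact pvStepInv N _ _ _ (pvPairGrid N (i, N+1-i) (by norm_num; omega) (by norm_num; omega) (by norm_num; omega) (by norm_num; omega)) hd'
    · exact hd'
  · apply pvElseInv N M star d2 _ hd2
    intro q hq
    rcases List.mem_map.mp hq with ⟨i, hi, rfl⟩
    rcases PySem.List.mem_pyRange_one.mp hi with ⟨hi1, hi2⟩
    have h1 := PySem.Int.mod_nonneg (star.2 - i) (b := N) (by omega)
    have h2 := PySem.Int.mod_lt (star.2 - i) (b := N) (by omega)
    exact pvPairGrid N _ (by simpa using hi1) (by norm_num; omega) (by norm_num; omega) (by norm_num; omega)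
  · apply pvElseInv N M star d2 _ hd2
    intro q hq
    rcases List.mem_map.mp hq with ⟨i, hi, rfl⟩
    rcases PySem.List.mem_pyRange_one.mp hi with ⟨hi1, hi2⟩
    have h1 := PySem.Int.mod_nonneg (star.2 + i - 2) (b := N) (by omega)
    have h2 := PySem.Int.mod_lt (star.2 + i - 2) (b := N) (by omega)
    exact pvPairGrid N _ (by simpa using hi1) (by norm_num; omega) (by norm_num; omega) (by norm_num; omega)

theorem pvScore_eq (N : Int) (C : PySem.Dict (List Int) String) (Ms : List (List Int × String))
    (hC : pvInv N C) (hMn : (Ms.map Prod.fst).Nodup) :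
    pvScoreGridA N C (PySem.Dict.mk Ms) = pvScoreSumB N C (PySem.Dict.mk Ms) := by
  obtain ⟨hCn, hCG⟩ := hC
  have hA : pvScoreGridA N C (PySem.Dict.mk Ms)
      = ((pvG N).map (pvF C (PySem.Dict.mk Ms))).sum := pvScoreA N C (PySem.Dict.mk Ms)
  have hcond : ∀ kv : List Int × String,
      (C.get? kv.1 = none ∧ PySem.List.len kv.1 = 2 ∧
        1 ≤ PySem.List.pyGetD kv.1 0 (0 : Int) ∧ PySem.List.pyGetD kv.1 0 (0 : Int) ≤ N ∧
        1 ≤ PySem.List.pyGetD kv.1 1 (0 : Int) ∧ PySem.List.pyGetD kv.1 1 (0 : Int) ≤ N)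
      ↔ (kv.1 ∈ pvG N ∧ C.get? kv.1 = none) := by
    intro kv
    constructor
    · rintro ⟨hc, hlen, h1, h2, h3, h4⟩
      refine ⟨?_, hc⟩
      have hl : kv.1.length = 2 := by simp [PySem.List.len_eq] at hlen; omega
      obtain ⟨a, b, hab⟩ := List.length_eq_two.mp hl
      rw [hab] at h1 h2 h3 h4 ⊢
      rw [show PySem.List.pyGetD [a, b] 0 (0 : Int) = a from rfl] at h1 h2
      rw [show PySem.List.pyGetD [a, b] 1 (0 : Int) = b from rfl] at h3 h4
      exact (mem_pvG N [a, b]).mpr ⟨a, b, rfl, h1, h2, h3, h4⟩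
    · rintro ⟨hg, hc⟩
      rcases (mem_pvG N kv.1).mp hg with ⟨a, b, hab, h1, h2, h3, h4⟩
      rw [hab]
      exact ⟨hab ▸ hc, rfl, h1, h2, h3, h4⟩
  have hB : pvScoreSumB N C (PySem.Dict.mk Ms)
      = (C.values.map (fun v => PySem.Dict.getD pvSb v 0)).sum
        + (Ms.map (fun kv => if kv.1 ∈ pvG N ∧ C.get? kv.1 = none
            then PySem.Dict.getD pvSb kv.2 0 else 0)).sum := by
    unfold pvScoreSumB
    have h1 : C.values.foldl (fun s v => s + PySem.Dict.getD pvSb v 0) 0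
        = (C.values.map (fun v => PySem.Dict.getD pvSb v 0)).sum := by
      rw [PySem.List.foldl_add]; ring
    rw [h1]
    have h2 : (PySem.Dict.mk Ms).items = Ms := rfl
    rw [h2]
    have h3 : (fun (s : Int) (kv : List Int × String) =>
        if C.get? kv.1 = none ∧ PySem.List.len kv.1 = 2 ∧
           1 ≤ PySem.List.pyGetD kv.1 0 (0 : Int) ∧ PySem.List.pyGetD kv.1 0 (0 : Int) ≤ N ∧
           1 ≤ PySem.List.pyGetD kv.1 1 (0 : Int) ∧ PySem.List.pyGetD kv.1 1 (0 : Int) ≤ N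
        then s + PySem.Dict.getD pvSb kv.2 0 else s)
        = (fun (s : Int) kv => s + (if kv.1 ∈ pvG N ∧ C.get? kv.1 = none
            then PySem.Dict.getD pvSb kv.2 0 else 0)) := by
      funext s kv
      by_cases h : kv.1 ∈ pvG N ∧ C.get? kv.1 = none
      · rw [if_pos ((hcond kv).mpr h), if_pos h]
      · rw [if_neg (fun hx => h ((hcond kv).mp hx)), if_neg h]
        ring
    rw [h3, PySem.List.foldl_add]
  rw [hA, hB, pvScoreSplit N C Ms hCn hCG hMn]


-- ===== VERDICT (by name: the statement is the Claim_ definition above) =====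
theorem f_spec : Claim_equal_f := by
  intro N Ms _ hpre
  obtain ⟨hN, hnodup, -⟩ := hpre
  unfold Spec_f
  rw [pv_f_view, pv_falt_view, pvStar_eq,
    pvChanged_eq N _ _ hN (pvStar_shape N _),
    pvScore_eq N _ Ms (pvChanged_inv N _ _ hN (pvStar_shape N _)) hnodup]
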